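-- pv_equiv track=rewrite | github.com/ZhuKerui/LongDoc | script/retrieval/sci_review/paper.py | strip_fixed_text
-- ===== SOURCE A (Python) =====
-- def strip_fixed_text(source_text:str, fixed_text:str, from_start:bool=True):
--     fixed_text = ''.join(fixed_text.split()).lower()
--     if not fixed_text or not source_text or len(fixed_text) > len(''.join(source_text.split())):
--         return source_text
--
--     source_text = source_text if from_start else source_text[::-1]
--     fixed_text = fixed_text if from_start else fixed_text[::-1]
--
--     fixed_char_idx = 0
--     for source_char_idx, source_char in enumerate(source_text):
--         if source_char.isspace():
--             continue
--         if source_char.lower() == fixed_text[fixed_char_idx]: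
--             fixed_char_idx += 1
--             if fixed_char_idx == len(fixed_text):
--                 source_text = source_text[source_char_idx+1:]
--                 break
--         else:
--             break
--     return source_text if from_start else source_text[::-1]
-- ===== SOURCE B (Python) =====
-- def strip_fixed_text(source_text: str, fixed_text: str, from_start: bool = True):
--     fixed_text = ''.join(fixed_text.split()).lower()
--     if not fixed_text or not source_text or len(fixed_text) > len(''.join(source_text.split())):
--         return source_text
--
--     src = source_text if from_start else source_text[::-1]
--     fx = fixed_text if from_start else fixed_text[::-1]
--
--     # index every non-whitespace character once, lowercased
--     pairs = [(i, c.lower()) for i, c in enumerate(src) if not c.isspace()]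
--     head = pairs[:len(fx)]
--     if [c for _, c in head] == list(fx):
--         src = src[head[-1][0] + 1:]
--     return src if from_start else src[::-1]
-- ===== Notes on version B (the rewrite author's own statement) =====
-- stated objective: alternative
-- what changed: Replaces A's stateful char-by-char scan with a mutable match counter and mid-loop breaks by building the list of (index, lowercased char) for all non-whitespace characters once, comparing its head to fixed_text wholesale, and slicing past the last matched index.
import Mathlib
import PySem

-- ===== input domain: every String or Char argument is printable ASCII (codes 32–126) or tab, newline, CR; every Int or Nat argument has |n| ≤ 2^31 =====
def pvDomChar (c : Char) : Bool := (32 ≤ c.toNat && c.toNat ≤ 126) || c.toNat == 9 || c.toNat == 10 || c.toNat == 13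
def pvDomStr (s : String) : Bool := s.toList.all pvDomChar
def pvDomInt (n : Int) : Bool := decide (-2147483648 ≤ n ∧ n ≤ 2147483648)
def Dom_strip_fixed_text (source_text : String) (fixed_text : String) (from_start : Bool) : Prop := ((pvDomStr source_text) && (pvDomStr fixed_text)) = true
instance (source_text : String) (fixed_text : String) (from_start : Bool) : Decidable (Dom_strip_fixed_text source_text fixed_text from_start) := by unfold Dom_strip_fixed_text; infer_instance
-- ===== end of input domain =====

-- B replaces A's stateful scan-with-break by building the indexed list of non-space
-- lowercased characters once and comparing its head to fixed_text wholesale (objective: alternative decomposition).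

-- ===== PORT A =====
-- the for-loop of A: scans src, skipping whitespace, matching successive chars of fx;
-- returns some cutIndex (= source_char_idx + 1) on a full match, none on mismatch / loop end
def pvAScan : List Char → Int → List Char → Option Int
  | [], _, _ => none
  | c :: rest, i, fx =>
    if PySem.Chars.isspace c then pvAScan rest (i + 1) fx
    else
      match fx with
      | [] => none   -- unreachable: A breaks before fixed_char_idx reaches len(fixed_text)
      | f :: fs =>
        if PySem.Chars.lowerChar c = f then
          if fs.isEmpty then some (i + 1) else pvAScan rest (i + 1) fs
        else none

def strip_fixed_text (source_text : String) (fixed_text : String) (from_start : Bool) : String :=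
  let fixed := PySem.Str.lower (PySem.Str.join "" (PySem.Str.split₀ fixed_text))
  if fixed.toList = [] ∨ source_text.toList = [] ∨
      PySem.Str.len fixed > PySem.Str.len (PySem.Str.join "" (PySem.Str.split₀ source_text)) then
    source_text
  else
    let src := if from_start then source_text.toList else source_text.toList.reverse
    let fx := if from_start then fixed.toList else fixed.toList.reverse
    let res := match pvAScan src 0 fx with
      | some k => PySem.List.slice src (some k) none
      | none => src
    String.ofList (if from_start then res else res.reverse)

-- ===== PORT B =====
-- [(i, c.lower()) for i, c in enumerate(src) if not c.isspace()]
def pvBPairs (src : List Char) : List (Int × Char) :=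
  ((PySem.List.enumerate src 0).filter (fun p => !PySem.Chars.isspace p.2)).map
    (fun p => (p.1, PySem.Chars.lowerChar p.2))

def strip_fixed_text_alt (source_text : String) (fixed_text : String) (from_start : Bool) : String :=
  let fixed := PySem.Str.lower (PySem.Str.join "" (PySem.Str.split₀ fixed_text))
  if fixed.toList = [] ∨ source_text.toList = [] ∨
      PySem.Str.len fixed > PySem.Str.len (PySem.Str.join "" (PySem.Str.split₀ source_text)) then
    source_text
  else
    let src := if from_start then source_text.toList else source_text.toList.reverse
    let fx := if from_start then fixed.toList else fixed.toList.reverse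
    let head := (pvBPairs src).take fx.length
    let res :=
      if head.map Prod.snd = fx then
        match head.getLast? with
        | some p => PySem.List.slice src (some (p.1 + 1)) none
        | none => src   -- unreachable: fx ≠ [] forces head ≠ []
      else src
    String.ofList (if from_start then res else res.reverse)

-- ===== PRECONDITION & SPEC =====
def Spec_strip_fixed_text (source_text : String) (fixed_text : String) (from_start : Bool) (out : String) : Prop := out = strip_fixed_text_alt source_text fixed_text from_start
instance (source_text : String) (fixed_text : String) (from_start : Bool) (out : String) : Decidable (Spec_strip_fixed_text source_text fixed_text from_start out) := by unfold Spec_strip_fixed_text; infer_instance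

-- ===== CLAIM (what is proved, stated in full; the proofs are below) =====
def Claim_equal_strip_fixed_text : Prop := ∀ (source_text : String) (fixed_text : String) (from_start : Bool), Dom_strip_fixed_text source_text fixed_text from_start → Spec_strip_fixed_text source_text fixed_text from_start (strip_fixed_text source_text fixed_text from_start)

-- ===== LEMMAS AND PROOFS =====
-- B's pair list, started at an arbitrary enumerate offset (for the induction)
def pvPairsFrom (src : List Char) (i : Int) : List (Int × Char) :=
  ((PySem.List.enumerate src i).filter (fun p => !PySem.Chars.isspace p.2)).map
    (fun p => (p.1, PySem.Chars.lowerChar p.2))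

theorem pvPairsFrom_nil (i : Int) : pvPairsFrom [] i = [] := rfl

theorem pvPairsFrom_cons (c : Char) (rest : List Char) (i : Int) :
    pvPairsFrom (c :: rest) i =
      if PySem.Chars.isspace c then pvPairsFrom rest (i + 1)
      else (i, PySem.Chars.lowerChar c) :: pvPairsFrom rest (i + 1) := by
  simp only [pvPairsFrom, PySem.List.enumerate_cons, List.filter_cons]
  by_cases h : PySem.Chars.isspace c <;> simp [h]

theorem pvBPairs_eq (src : List Char) : pvBPairs src = pvPairsFrom src 0 := rfl

theorem pvScan_eq (src : List Char) : ∀ (i : Int) (fx : List Char), fx ≠ [] →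
    pvAScan src i fx =
      (let head := (pvPairsFrom src i).take fx.length
       if head.map Prod.snd = fx then head.getLast?.map (fun p => p.1 + 1) else none) := by
  induction src with
  | nil =>
    intro i fx hfx
    simp [pvAScan, pvPairsFrom_nil, Ne.symm hfx]
  | cons c rest ih =>
    intro i fx hfx
    rw [pvPairsFrom_cons]
    by_cases hsp : PySem.Chars.isspace c
    · simp only [pvAScan, hsp, if_true]
      exact ih (i + 1) fx hfx
    · match fx with
      | f :: fs =>
        simp only [pvAScan, hsp, if_false, Bool.false_eq_true]
        by_cases hc : PySem.Chars.lowerChar c = f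
        · subst hc
          match hfs : fs with
          | [] =>
            simp
          | g :: gs =>
            simp only [List.isEmpty_cons, if_false, Bool.false_eq_true]
            rw [ih (i + 1) (g :: gs) (by simp)]
            simp only [List.length_cons, List.take_succ_cons, List.map_cons, List.cons.injEq,
              true_and]
            by_cases hm : ((pvPairsFrom rest (i + 1)).take (gs.length + 1)).map Prod.snd = g :: gs
            · have hne : (pvPairsFrom rest (i + 1)).take (gs.length + 1) ≠ [] := by
                intro h0; rw [h0] at hm; simp at hm
              obtain ⟨y, ys, hT⟩ := List.exists_cons_of_ne_nil hne
              simp only [if_true, hT, List.getLast?_cons_cons]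
            · simp only [hm, if_false]
              simp
        · simp [hc]

theorem pvCore_eq (src fx : List Char) (h : fx ≠ []) :
    (match pvAScan src 0 fx with
     | some k => PySem.List.slice src (some k) none
     | none => src)
    = (if ((pvBPairs src).take fx.length).map Prod.snd = fx then
         match ((pvBPairs src).take fx.length).getLast? with
         | some p => PySem.List.slice src (some (p.1 + 1)) none
         | none => src
       else src) := by
  rw [pvBPairs_eq, pvScan_eq src 0 fx h]
  by_cases hm : ((pvPairsFrom src 0).take fx.length).map Prod.snd = fx
  · simp only [hm, if_true]
    cases ((pvPairsFrom src 0).take fx.length).getLast? <;> simp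
  · rw [if_neg hm, if_neg hm]

theorem strip_fixed_text_eq_alt (source_text fixed_text : String) (from_start : Bool) :
    strip_fixed_text source_text fixed_text from_start
      = strip_fixed_text_alt source_text fixed_text from_start := by
  simp only [strip_fixed_text, strip_fixed_text_alt]
  by_cases hguard : (PySem.Str.lower (PySem.Str.join "" (PySem.Str.split₀ fixed_text))).toList = [] ∨
      source_text.toList = [] ∨
      PySem.Str.len (PySem.Str.lower (PySem.Str.join "" (PySem.Str.split₀ fixed_text))) >
        PySem.Str.len (PySem.Str.join "" (PySem.Str.split₀ source_text))
  · rw [if_pos hguard, if_pos hguard]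
  · rw [if_neg hguard, if_neg hguard]
    have hfx0 : (PySem.Str.lower (PySem.Str.join "" (PySem.Str.split₀ fixed_text))).toList ≠ [] :=
      fun h => hguard (Or.inl h)
    cases from_start with
    | true =>
      simp only [if_true]
      exact congrArg String.ofList (pvCore_eq _ _ hfx0)
    | false =>
      simp only [Bool.false_eq_true, if_false]
      exact congrArg String.ofList (congrArg List.reverse
        (pvCore_eq _ _ (by simpa using hfx0)))

-- ===== VERDICT (by name: the statement is the Claim_ definition above) =====
theorem strip_fixed_text_spec : Claim_equal_strip_fixed_text := by
  intro s f b _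
  unfold Spec_strip_fixed_text
  exact strip_fixed_text_eq_alt s f b
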